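-- pv_equiv track=rewrite | github.com/MarcoGorelli/auto-walrus | auto_walrus.py | _is_right_side_name_used_between_assignment_and_if
-- ===== SOURCE A (Python) =====
-- from typing import Tuple
--
-- Token = Tuple[str, int, int, int, int]
--
-- def name_lineno_col_offset_list(
--         tokens: list[Token],
-- ) -> list[tuple[str, int, int]]:
--     return [(token[0], token[1], token[2]) for token in tokens]
--
-- def name_lineno_col_offset(tokens: Token) -> tuple[str, int, int]:
--     return tokens[0], tokens[1], tokens[2]
--
-- def _is_right_side_name_used_between_assignment_and_if(
--     assignment_idx: int,
--     if_statement_idx: int,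
--     related: list[Token],
--     should_break: bool,
--     sorted_names: list[Token],
-- ) -> bool:
--     # Check that names which appear in right hand side of
--     # assignment aren't used between assignment and if-statement.
--     for rel in related:
--         usages = [
--             name for name in sorted_names if name[0] == rel[0] if name != rel
--         ]
--         for usage in usages:
--             rel_used_idx = name_lineno_col_offset_list(
--                 sorted_names,
--             ).index(name_lineno_col_offset(usage))
--             if assignment_idx < rel_used_idx < if_statement_idx:
--                 should_break = True
--     return should_break
-- ===== SOURCE B (Python) =====
-- def _is_right_side_name_used_between_assignment_and_if(
--     assignment_idx,
--     if_statement_idx,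
--     related,
--     should_break,
--     sorted_names,
-- ):
--     # One sweep builds a first-occurrence index table for the projected
--     # (name, lineno, col) triples; then a single positional pass over
--     # sorted_names replaces the related x usages x .index rescans.
--     if should_break:
--         return True
--     first_idx = {}
--     for i, tok in enumerate(sorted_names):
--         key = (tok[0], tok[1], tok[2])
--         if key not in first_idx:
--             first_idx[key] = i
--     for name in sorted_names:
--         if assignment_idx < first_idx[(name[0], name[1], name[2])] < if_statement_idx:
--             if any(rel[0] == name[0] and rel != name for rel in related):
--                 return True
--     return False
-- ===== Notes on version B (the rewrite author's own statement) =====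
-- stated objective: faster
-- what changed: Replaces the related x usages nesting with repeated list .index rescans by one sweep building a dict of first-occurrence indices of the projected triples, then a single positional pass over sorted_names with an any() over related.
import Mathlib
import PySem

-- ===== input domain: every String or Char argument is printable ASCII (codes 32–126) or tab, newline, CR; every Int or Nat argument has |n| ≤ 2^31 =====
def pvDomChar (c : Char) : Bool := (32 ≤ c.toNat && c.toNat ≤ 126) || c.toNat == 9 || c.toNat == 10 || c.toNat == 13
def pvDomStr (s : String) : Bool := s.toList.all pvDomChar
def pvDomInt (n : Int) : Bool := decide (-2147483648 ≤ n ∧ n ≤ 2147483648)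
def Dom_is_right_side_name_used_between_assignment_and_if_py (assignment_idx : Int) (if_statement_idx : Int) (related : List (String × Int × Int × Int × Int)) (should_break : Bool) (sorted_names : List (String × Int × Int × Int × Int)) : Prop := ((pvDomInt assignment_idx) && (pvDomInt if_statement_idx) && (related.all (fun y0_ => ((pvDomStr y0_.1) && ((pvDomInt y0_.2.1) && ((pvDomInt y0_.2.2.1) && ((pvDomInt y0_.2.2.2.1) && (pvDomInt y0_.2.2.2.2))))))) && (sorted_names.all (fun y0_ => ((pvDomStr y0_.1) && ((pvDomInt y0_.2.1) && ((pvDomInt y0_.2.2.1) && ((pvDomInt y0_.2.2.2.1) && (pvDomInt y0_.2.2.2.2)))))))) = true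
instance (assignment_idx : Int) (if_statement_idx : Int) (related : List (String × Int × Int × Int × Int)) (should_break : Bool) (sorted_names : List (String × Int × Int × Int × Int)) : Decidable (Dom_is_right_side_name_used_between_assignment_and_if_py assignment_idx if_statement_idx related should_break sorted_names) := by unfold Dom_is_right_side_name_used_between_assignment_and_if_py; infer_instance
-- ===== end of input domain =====

-- B replaces A's related x usages x .index rescans by one sweep building a first-occurrence
-- index dict over the projected triples plus a single positional pass (objective: faster).
-- ===== PORT A =====
def pvTriple (t : String × Int × Int × Int × Int) : String × Int × Int := (t.1, t.2.1, t.2.2.1)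

-- Port of A: for rel in related, usages = filtered sorted_names, inner loop sets
-- should_break via .index on the mapped triple list (ValueError branch unreachable:
-- the looked-up triple comes from an element of sorted_names).
def is_right_side_name_used_between_assignment_and_if_py (assignment_idx : Int) (if_statement_idx : Int) (related : List (String × Int × Int × Int × Int)) (should_break : Bool) (sorted_names : List (String × Int × Int × Int × Int)) : Bool :=
  related.foldl (fun sb rel =>
    let usages := sorted_names.filter (fun name => name.1 == rel.1 && name != rel)
    usages.foldl (fun sb2 usage =>
      match PySem.List.index? (sorted_names.map pvTriple) (pvTriple usage) with
      | some rel_used_idx =>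
          if assignment_idx < (rel_used_idx : Int) ∧ (rel_used_idx : Int) < if_statement_idx then true else sb2
      | none => sb2) sb) should_break

-- ===== PORT B =====
-- first_idx: dict mapping each projected triple to its first index in sorted_names
def pvFirstIdx (sorted_names : List (String × Int × Int × Int × Int)) : PySem.Dict (String × Int × Int) Int :=
  (PySem.List.enumerate sorted_names).foldl
    (fun d p => if d.contains (pvTriple p.2) then d else d.insert (pvTriple p.2) p.1)
    PySem.Dict.empty

-- Port of B: build the first-index dict once, then one pass over sorted_names
-- (the none branch of the lookup is unreachable: every triple was inserted).
def is_right_side_name_used_between_assignment_and_if_py_alt (assignment_idx : Int) (if_statement_idx : Int) (related : List (String × Int × Int × Int × Int)) (should_break : Bool) (sorted_names : List (String × Int × Int × Int × Int)) : Bool :=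
  if should_break then true
  else
    let first_idx := pvFirstIdx sorted_names
    sorted_names.any (fun name =>
      (match first_idx.get? (pvTriple name) with
       | some i => decide (assignment_idx < i ∧ i < if_statement_idx)
       | none => false)
      && related.any (fun rel => rel.1 == name.1 && rel != name))

-- ===== PRECONDITION & SPEC =====
def Spec_is_right_side_name_used_between_assignment_and_if_py (assignment_idx : Int) (if_statement_idx : Int) (related : List (String × Int × Int × Int × Int)) (should_break : Bool) (sorted_names : List (String × Int × Int × Int × Int)) (out : Bool) : Prop := out = is_right_side_name_used_between_assignment_and_if_py_alt assignment_idx if_statement_idx related should_break sorted_names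
instance (assignment_idx : Int) (if_statement_idx : Int) (related : List (String × Int × Int × Int × Int)) (should_break : Bool) (sorted_names : List (String × Int × Int × Int × Int)) (out : Bool) : Decidable (Spec_is_right_side_name_used_between_assignment_and_if_py assignment_idx if_statement_idx related should_break sorted_names out) := by unfold Spec_is_right_side_name_used_between_assignment_and_if_py; infer_instance

-- ===== CLAIM (what is proved, stated in full; the proofs are below) =====
def Claim_equal_is_right_side_name_used_between_assignment_and_if_py : Prop := ∀ (assignment_idx : Int) (if_statement_idx : Int) (related : List (String × Int × Int × Int × Int)) (should_break : Bool) (sorted_names : List (String × Int × Int × Int × Int)), Dom_is_right_side_name_used_between_assignment_and_if_py assignment_idx if_statement_idx related should_break sorted_names → Spec_is_right_side_name_used_between_assignment_and_if_py assignment_idx if_statement_idx related should_break sorted_names (is_right_side_name_used_between_assignment_and_if_py assignment_idx if_statement_idx related should_break sorted_names)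

-- ===== LEMMAS AND PROOFS =====

-- ===== VERDICT (by name: the statement is the Claim_ definition above) =====


theorem pv_foldl_or {α : Type} (l : List α) (p : α → Bool) (b : Bool) :
    l.foldl (fun s x => s || p x) b = (b || l.any p) := by
  induction l generalizing b with
  | nil => simp
  | cons x xs ih => simp [List.foldl_cons, ih, Bool.or_assoc]

theorem pv_foldl_if_true {α : Type} (l : List α) (p : α → Bool) (b : Bool) :
    l.foldl (fun s x => if p x then true else s) b = (b || l.any p) := by
  have h : (fun (s : Bool) (x : α) => if p x then true else s) = fun s x => s || p x := by
    funext s x; cases p x <;> simp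
  rw [h, pv_foldl_or]

-- the inner match of port A as a predicate
def pvHit (assignment_idx if_statement_idx : Int) (sorted_names : List (String × Int × Int × Int × Int)) (usage : String × Int × Int × Int × Int) : Bool :=
  match PySem.List.index? (sorted_names.map pvTriple) (pvTriple usage) with
  | some i => decide (assignment_idx < (i : Int) ∧ (i : Int) < if_statement_idx)
  | none => false

theorem pvA_eq (a b : Int) (related : List (String × Int × Int × Int × Int)) (sb : Bool) (sn : List (String × Int × Int × Int × Int)) :
    is_right_side_name_used_between_assignment_and_if_py a b related sb sn
      = (sb || related.any (fun rel => sn.any (fun name => (name.1 == rel.1 && name != rel) && pvHit a b sn name))) := by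
  unfold is_right_side_name_used_between_assignment_and_if_py
  have hinner : ∀ (l : List (String × Int × Int × Int × Int)) (s : Bool),
      l.foldl (fun sb2 usage =>
        match PySem.List.index? (sn.map pvTriple) (pvTriple usage) with
        | some rel_used_idx => if a < (rel_used_idx : Int) ∧ (rel_used_idx : Int) < b then true else sb2
        | none => sb2) s = (s || l.any (pvHit a b sn)) := by
    intro l s
    rw [← pv_foldl_if_true l (pvHit a b sn) s]
    apply PySem.List.foldl_congr_mem
    intro s' u _
    unfold pvHit
    cases PySem.List.index? (sn.map pvTriple) (pvTriple u) with
    | none => simp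
    | some i => by_cases h : a < (i : Int) ∧ (i : Int) < b <;> simp [h]
  calc related.foldl (fun sb rel =>
          (sn.filter (fun name => name.1 == rel.1 && name != rel)).foldl (fun sb2 usage =>
            match PySem.List.index? (sn.map pvTriple) (pvTriple usage) with
            | some rel_used_idx => if a < (rel_used_idx : Int) ∧ (rel_used_idx : Int) < b then true else sb2
            | none => sb2) sb) sb
      = related.foldl (fun s rel => s || (sn.filter (fun name => name.1 == rel.1 && name != rel)).any (pvHit a b sn)) sb := by
        apply PySem.List.foldl_congr_mem
        intro s rel _
        exact hinner _ s
    _ = (sb || related.any (fun rel => (sn.filter (fun name => name.1 == rel.1 && name != rel)).any (pvHit a b sn))) := pv_foldl_or ..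
    _ = _ := by
        congr 1
        exact List.any_congr rfl (fun rel => List.any_filter)

theorem pvFirstIdx_get? (sn : List (String × Int × Int × Int × Int)) (k : String × Int × Int) :
    (pvFirstIdx sn).get? k = (PySem.List.index? (sn.map pvTriple) k).map (fun n => (n : Int)) := by
  unfold pvFirstIdx
  have main : ∀ (l : List (String × Int × Int × Int × Int)) (s : Int) (d : PySem.Dict (String × Int × Int) Int),
      ((PySem.List.enumerate l s).foldl
        (fun d p => if d.contains (pvTriple p.2) then d else d.insert (pvTriple p.2) p.1) d).get? k
      = match d.get? k with
        | some v => some v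
        | none => (PySem.List.index? (l.map pvTriple) k).map (fun n => s + (n : Int)) := by
    intro l
    induction l with
    | nil =>
        intro s d
        simp only [PySem.List.enumerate_nil, List.foldl_nil, List.map_nil]
        cases d.get? k <;> simp [PySem.List.index?]
    | cons x xs ih =>
        intro s d
        rw [PySem.List.enumerate_cons, List.foldl_cons]
        rw [ih]
        by_cases hk : pvTriple x = k
        · subst hk
          rw [List.map_cons, PySem.List.index?_cons_self]
          by_cases hc : d.contains (pvTriple x) = true
          · simp only [hc, if_true]
            have hs : (d.get? (pvTriple x)).isSome := by
              rw [← PySem.Dict.contains_eq_isSome_get?]; exact hc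
            cases hg : d.get? (pvTriple x) with
            | none => rw [hg] at hs; simp at hs
            | some v => simp
          · simp only [hc]
            have hg : d.get? (pvTriple x) = none := by
              rw [PySem.Dict.get?_eq_none_iff_contains]; simpa using hc
            simp [hg, PySem.Dict.get?_insert_self]
        · rw [List.map_cons, PySem.List.index?_cons_of_ne _ hk]
          have hgd : (if d.contains (pvTriple x) then d else d.insert (pvTriple x) s).get? k = d.get? k := by
            by_cases hc : d.contains (pvTriple x) = true <;>
              simp [hc, PySem.Dict.get?_insert_of_ne d s (Ne.symm hk)]
          simp only [hgd]
          cases d.get? k with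
          | some v => rfl
          | none =>
              cases PySem.List.index? (xs.map pvTriple) k with
              | none => rfl
              | some n => simp; omega
  rw [main sn 0 PySem.Dict.empty]
  simp [PySem.Dict.get?_empty]

theorem pvB_eq (a b : Int) (related : List (String × Int × Int × Int × Int)) (sb : Bool) (sn : List (String × Int × Int × Int × Int)) :
    is_right_side_name_used_between_assignment_and_if_py_alt a b related sb sn
      = (sb || sn.any (fun name => pvHit a b sn name && related.any (fun rel => rel.1 == name.1 && rel != name))) := by
  unfold is_right_side_name_used_between_assignment_and_if_py_alt
  by_cases hsb : sb = true
  · simp [hsb]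
  · simp only [Bool.not_eq_true] at hsb
    simp only [hsb, Bool.false_eq_true, if_false, Bool.false_or]
    apply List.any_congr rfl
    intro name
    congr 1
    rw [pvFirstIdx_get?]
    unfold pvHit
    cases PySem.List.index? (sn.map pvTriple) (pvTriple name) <;> simp

theorem pv_swap (a b : Int) (related sn : List (String × Int × Int × Int × Int)) :
    related.any (fun rel => sn.any (fun name => (name.1 == rel.1 && name != rel) && pvHit a b sn name))
      = sn.any (fun name => pvHit a b sn name && related.any (fun rel => rel.1 == name.1 && rel != name)) := by
  rw [Bool.eq_iff_iff]
  simp only [List.any_eq_true, Bool.and_eq_true, beq_iff_eq, bne_iff_ne, ne_eq]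
  constructor
  · rintro ⟨rel, hrel, name, hname, ⟨⟨h1, h2⟩, h3⟩⟩
    exact ⟨name, hname, h3, rel, hrel, h1.symm, fun h => h2 h.symm⟩
  · rintro ⟨name, hname, h3, rel, hrel, h1, h2⟩
    exact ⟨rel, hrel, name, hname, ⟨⟨h1.symm, fun h => h2 h.symm⟩, h3⟩⟩

-- ===== VERDICT =====
theorem is_right_side_name_used_between_assignment_and_if_py_spec : Claim_equal_is_right_side_name_used_between_assignment_and_if_py := by
  intro a b related sb sn _
  unfold Spec_is_right_side_name_used_between_assignment_and_if_py
  rw [pvA_eq, pvB_eq, pv_swap]
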